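-- pv_equiv track=rewrite | github.com/ivkumar2004/Python | sample/coin_energy.py | energy_or_coin
-- ===== SOURCE A (Python) =====
-- energy = [1,3,1,1]
--
-- coin = [2,1,1,3]
--
-- def energy_or_coin(num,index):
--     result = 'energy'
--     if len(coin[index+1:len(energy)]) < num: return 'coin'
--     for int_coins in sorted(coin[(index+1):len(coin)])[::-1][0:num]:
--         if coin[index] >= int_coins:
--             result = 'coin'
--             break
--     else:
--         if index == len(coin)-1: return 'coin'
--     return result
-- ===== SOURCE B (Python) =====
-- energy = [1,3,1,1]
--
-- coin = [2,1,1,3]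
--
-- def energy_or_coin(num, index):
--     if index == len(coin) - 1:
--         return 'coin'
--     rest = coin[index+1:len(energy)]
--     if len(rest) < num:
--         return 'coin'
--     if num <= 0:
--         return 'energy'
--     greater = sum(v > coin[index] for v in rest)
--     return 'energy' if greater >= num else 'coin'
-- ===== Notes on version B (the rewrite author's own statement) =====
-- stated objective: simpler
-- what changed: B replaces A's sort-reverse-slice-and-scan of the candidate coins by a single counting pass ('energy' iff at least num candidates are strictly greater than coin[index]), with the last-index and too-few-candidates rules as plain early returns; Pre_ excludes the negative num (-3..-1 with candidates present) on which A's accidental [0:num] slice truncates the candidate list -- a requested count of coins is naturally non-negative -- and the far-negative index (<= -5 with num 1..4) on which A raises IndexError at coin[index].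
-- outside the precondition, e.g. on energy_or_coin(-1, 0): A returns 'coin', B returns 'energy'; on energy_or_coin(1, -5): A raises IndexError, B raises IndexError
import Mathlib
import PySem

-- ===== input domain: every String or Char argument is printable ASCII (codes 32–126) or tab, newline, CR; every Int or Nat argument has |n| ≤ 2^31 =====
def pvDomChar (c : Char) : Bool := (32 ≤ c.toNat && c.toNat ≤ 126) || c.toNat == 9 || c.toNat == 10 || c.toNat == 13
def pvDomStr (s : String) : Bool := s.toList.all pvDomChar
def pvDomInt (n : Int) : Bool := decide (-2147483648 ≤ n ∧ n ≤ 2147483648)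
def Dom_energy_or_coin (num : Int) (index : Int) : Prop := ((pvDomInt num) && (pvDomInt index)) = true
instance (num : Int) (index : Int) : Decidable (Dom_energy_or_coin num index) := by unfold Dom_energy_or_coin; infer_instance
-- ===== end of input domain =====

-- B drops A's sort/reverse/slice scan for a single counting pass over the candidates (objective: simpler).

def pvEnergy : List Int := [1, 3, 1, 1]
def pvCoin : List Int := [2, 1, 1, 3]

-- ===== PORT A =====
-- Python's for/else over the top-num candidates: break → "coin"; loop exhausted → else clause.
-- coin[index] is read inside the loop body; 'none' is Python's IndexError (excluded by Pre_).
def pvLoopA (index : Int) : List Int → String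
  | [] => if index = (pvCoin.length : Int) - 1 then "coin" else "energy"
  | v :: rest =>
    match PySem.List.pyGet? pvCoin index with
    | none => ""  -- Python raises IndexError here; outside Pre_
    | some c => if c ≥ v then "coin" else pvLoopA index rest

def energy_or_coin (num : Int) (index : Int) : String :=
  if ((PySem.List.slice pvCoin (some (index + 1)) (some (pvEnergy.length : Int))).length : Int) < num
  then "coin"
  else
    -- sorted(coin[index+1:len(coin)])[::-1][0:num]   ([::-1] ported as List.reverse)
    pvLoopA index
      (PySem.List.slice
        ((PySem.List.sorted (PySem.List.slice pvCoin (some (index + 1)) (some (pvCoin.length : Int))) id).reverse)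
        (some 0) (some num))

-- ===== PORT B =====
def energy_or_coin_alt (num : Int) (index : Int) : String :=
  if index = (pvCoin.length : Int) - 1 then "coin"
  else
    let rest := PySem.List.slice pvCoin (some (index + 1)) (some (pvEnergy.length : Int))
    if (rest.length : Int) < num then "coin"
    else if num ≤ 0 then "energy"
    else
      match PySem.List.pyGet? pvCoin index with
      | none => ""  -- Python raises IndexError here; outside Pre_
      | some pivot =>
        if num ≤ ((rest.countP (fun v => decide (pivot < v)) : Nat) : Int) then "energy" else "coin"

-- ===== PRECONDITION & SPEC =====
-- Pre_ excludes the negative num (-3..-1 with candidate coins present, index ≤ 2) on which A's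
-- accidental [0:num] slice truncates the candidate list — a requested count of coins is naturally
-- non-negative — and the far-negative index (≤ -5 with num 1..4) on which A raises IndexError.
def Pre_energy_or_coin (num : Int) (index : Int) : Prop :=
  ¬ ((-3 ≤ num ∧ num ≤ -1 ∧ index ≤ 2) ∨ (index ≤ -5 ∧ 1 ≤ num ∧ num ≤ 4))
instance (num : Int) (index : Int) : Decidable (Pre_energy_or_coin num index) := by
  unfold Pre_energy_or_coin; infer_instance

def pvWitness_energy_or_coin : Int × Int := (2, 0)

def Spec_energy_or_coin (num : Int) (index : Int) (out : String) : Prop := out = energy_or_coin_alt num index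
instance (num : Int) (index : Int) (out : String) : Decidable (Spec_energy_or_coin num index out) := by unfold Spec_energy_or_coin; infer_instance

-- ===== CLAIM (what is proved, stated in full; the proofs are below) =====
def Claim_equal_energy_or_coin : Prop := ∀ (num : Int) (index : Int), Dom_energy_or_coin num index → Pre_energy_or_coin num index → Spec_energy_or_coin num index (energy_or_coin num index)

-- ===== LEMMAS AND PROOFS =====

lemma slice_len_le {α : Type} (xs : List α) (a b : Int) :
    (PySem.List.slice xs (some a) (some b)).length ≤ xs.length := by
  simp only [PySem.List.slice, List.length_take, List.length_drop]
  omega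

-- a [0:n] slice with n + length ≤ 0 is empty
lemma slice_zero_nonpos {xs : List Int} {n : Int} (h : n + (xs.length : Int) ≤ 0) :
    PySem.List.slice xs (some 0) (some n) = [] := by
  simp only [PySem.List.slice, PySem.List.clampIdx]
  split_ifs <;> simp_all <;> omega

-- a [0:0] slice is empty
lemma slice_zero_zero {xs : List Int} :
    PySem.List.slice xs (some 0) (some 0) = [] := by
  simp only [PySem.List.slice, PySem.List.clampIdx]
  split_ifs <;> simp_all

-- slice of the constant list for starts past the end
lemma slice_coin_high {i : Int} (h : 3 ≤ i) :
    PySem.List.slice pvCoin (some (i + 1)) (some 4) = [] := by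
  simp only [PySem.List.slice, PySem.List.clampIdx, pvCoin]
  norm_num
  split_ifs <;> simp_all <;> omega

-- num ≥ 5: the length guard fires in both programs
lemma both_coin_of_big (num index : Int) (h : 5 ≤ num) :
    energy_or_coin num index = energy_or_coin_alt num index := by
  have hl := slice_len_le pvCoin (index + 1) ((pvEnergy.length : Nat) : Int)
  have hc : pvCoin.length = 4 := by decide
  simp only [energy_or_coin, energy_or_coin_alt]
  rw [if_pos (by omega)]
  by_cases h3 : index = (pvCoin.length : Int) - 1
  · rw [if_pos h3]
  · rw [if_neg h3, if_pos (by omega)]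

-- num ≤ 0 (outside -3..-1 with candidates): the examined slice is empty;
-- A falls to the for/else edge rule, B to its num ≤ 0 branch
lemma both_nonpos (num index : Int) (h : num ≤ 0)
    (hok : num = 0 ∨ num ≤ -4 ∨ 3 ≤ index) :
    energy_or_coin num index = energy_or_coin_alt num index := by
  have hl := slice_len_le pvCoin (index + 1) ((pvEnergy.length : Nat) : Int)
  have hc : pvCoin.length = 4 := by decide
  have hE : ((pvEnergy.length : Nat) : Int) = 4 := by decide
  have hC : ((pvCoin.length : Nat) : Int) = 4 := by decide
  have hloop :
      PySem.List.slice
        ((PySem.List.sorted (PySem.List.slice pvCoin (some (index + 1)) (some ((pvCoin.length : Nat) : Int))) id).reverse)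
        (some 0) (some num) = [] := by
    rcases hok with h0 | h4 | hi
    · subst h0; exact slice_zero_zero
    · have hlen := slice_len_le pvCoin (index + 1) ((pvCoin.length : Nat) : Int)
      have hs := PySem.List.length_sorted (PySem.List.slice pvCoin (some (index + 1)) (some ((pvCoin.length : Nat) : Int))) id false
      refine slice_zero_nonpos ?_
      simp only [List.length_reverse]
      omega
    · rw [hC, slice_coin_high hi]
      exact slice_zero_nonpos (by simp; omega)
  simp only [energy_or_coin, energy_or_coin_alt]
  rw [if_neg (by omega), hloop]
  simp only [pvLoopA]
  by_cases h3 : index = (pvCoin.length : Int) - 1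
  · rw [if_pos h3, if_pos h3]
  · rw [if_neg h3, if_neg h3, if_neg (by omega), if_pos h]

theorem energy_or_coin_key (num index : Int) (hpre : Pre_energy_or_coin num index) :
    energy_or_coin num index = energy_or_coin_alt num index := by
  unfold Pre_energy_or_coin at hpre
  by_cases hbig : 5 ≤ num
  · exact both_coin_of_big num index hbig
  by_cases hpos : 1 ≤ num
  · -- num ∈ 1..4; Pre_ gives index ≥ -4
    have hi1 : -4 ≤ index := by omega
    by_cases hhi : 3 ≤ index
    · -- no candidate coins: the length guard fires in both programs
      have hE : ((pvEnergy.length : Nat) : Int) = 4 := by decide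
      simp only [energy_or_coin, energy_or_coin_alt, hE, slice_coin_high hhi]
      rw [if_pos (by simp; omega)]
      by_cases h3 : index = (pvCoin.length : Int) - 1
      · rw [if_pos h3]
      · rw [if_neg h3, if_pos (by simp; omega)]
    · have hn2 : num ≤ 4 := by omega
      have hi2 : index ≤ 2 := by omega
      interval_cases num <;> interval_cases index <;> decide
  · -- num ≤ 0; Pre_ rules out -3..-1 with index ≤ 2
    exact both_nonpos num index (by omega) (by omega)

-- ===== VERDICT (by name: the statement is the Claim_ definition above) =====
theorem energy_or_coin_spec : Claim_equal_energy_or_coin := by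
  intro num index _ hpre
  unfold Spec_energy_or_coin
  exact energy_or_coin_key num index hpre
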